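-- pv_equiv track=rewrite | github.com/szampier/adventofcode2020 | src/day06.py | parse
-- ===== SOURCE A (Python) =====
-- def parse(lines):
--     group = []
--     groups = []
--     for line in lines:
--         if line == '':
--             groups.append(group)
--             group = []
--         else:
--             group.append(set(line))
--     groups.append(group)
--     return groups
-- ===== SOURCE B (Python) =====
-- def parse(lines):
--     # two-phase: collect delimiter indices, then build groups by slicing
--     delims = [i for i, line in enumerate(lines) if line == '']
--     groups = []
--     start = 0
--     for p in delims:
--         groups.append([set(x) for x in lines[start:p]])
--         start = p + 1
--     groups.append([set(x) for x in lines[start:]])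
--     return groups
-- ===== Notes on version B (the rewrite author's own statement) =====
-- stated objective: alternative
-- what changed: Replaced the accumulate-and-flush single loop with a two-phase shape: first collect the indices of all empty lines, then build each group by slicing the input between consecutive delimiters.
import Mathlib
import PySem

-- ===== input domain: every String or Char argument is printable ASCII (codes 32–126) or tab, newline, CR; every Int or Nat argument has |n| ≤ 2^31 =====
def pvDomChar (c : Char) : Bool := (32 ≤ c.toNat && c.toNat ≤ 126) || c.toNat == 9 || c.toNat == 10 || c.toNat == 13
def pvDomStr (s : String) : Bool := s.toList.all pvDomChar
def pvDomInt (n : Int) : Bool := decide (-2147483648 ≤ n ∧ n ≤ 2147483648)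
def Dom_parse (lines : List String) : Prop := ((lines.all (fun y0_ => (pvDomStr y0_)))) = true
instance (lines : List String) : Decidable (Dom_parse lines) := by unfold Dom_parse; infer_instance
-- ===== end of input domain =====

-- B replaces A's accumulate-and-flush loop by a two-phase index-then-slice decomposition (alternative, same cost).

-- ===== PORT A =====
-- set(line) for a Python str: the distinct one-character strings, first occurrence order
def pvSetOf (s : String) : List String :=
  PySem.Set.ofList (s.toList.map (fun c => String.ofList [c]))

def parseLoop : List String → List (List String) → List (List (List String)) → List (List (List String))
  | [], group, groups => groups ++ [group]
  | l :: ls, group, groups =>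
    if l = "" then parseLoop ls [] (groups ++ [group])
    else parseLoop ls (group ++ [pvSetOf l]) groups

def parse (lines : List String) : List (List (List String)) :=
  parseLoop lines [] []

-- ===== PORT B =====
def pvDelims (lines : List String) : List Int :=
  (PySem.List.enumerate lines 0).filterMap (fun p => if p.2 = "" then some p.1 else none)

def pvGoB (lines : List String) : List Int → Int → List (List (List String)) → List (List (List String))
  | [], start, groups => groups ++ [(PySem.List.slice lines (some start) none).map pvSetOf]
  | p :: ps, start, groups =>
      pvGoB lines ps (p + 1) (groups ++ [(PySem.List.slice lines (some start) (some p)).map pvSetOf])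

def parse_alt (lines : List String) : List (List (List String)) :=
  pvGoB lines (pvDelims lines) 0 []

-- ===== PRECONDITION & SPEC =====
def Spec_parse (lines : List String) (out : List (List (List String))) : Prop := out = parse_alt lines
instance (lines : List String) (out : List (List (List String))) : Decidable (Spec_parse lines out) := by unfold Spec_parse; infer_instance

-- ===== CLAIM (what is proved, stated in full; the proofs are below) =====
def Claim_equal_parse : Prop := ∀ (lines : List String), Dom_parse lines → Spec_parse lines (parse lines)

-- ===== LEMMAS AND PROOFS =====

-- reference splitting function both ports are reduced to
def pvSplit : List String → List (List (List String))
  | [] => [[]]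
  | l :: ls =>
    if l = "" then [] :: pvSplit ls
    else match pvSplit ls with
      | [] => [[pvSetOf l]]
      | g :: gs => (pvSetOf l :: g) :: gs

def pvPrep (g : List (List String)) : List (List (List String)) → List (List (List String))
  | [] => [g]
  | h :: t => (g ++ h) :: t

theorem pvSplit_ne_nil : ∀ ls, pvSplit ls ≠ [] := by
  intro ls
  cases ls with
  | nil => simp [pvSplit]
  | cons l ls =>
    simp only [pvSplit]
    split_ifs
    · simp
    · cases h : pvSplit ls <;> simp

theorem parseLoop_eq : ∀ (ls : List String) (g : List (List String)) (gs : List (List (List String))),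
    parseLoop ls g gs = gs ++ pvPrep g (pvSplit ls) := by
  intro ls
  induction ls with
  | nil => intro g gs; simp [parseLoop, pvSplit, pvPrep]
  | cons l ls ih =>
    intro g gs
    by_cases h : l = ""
    · have hne := pvSplit_ne_nil ls
      cases hs : pvSplit ls with
      | nil => exact absurd hs hne
      | cons a t =>
        simp [parseLoop, h, pvSplit, pvPrep, ih, hs]
    · cases hs : pvSplit ls with
      | nil => exact absurd hs (pvSplit_ne_nil ls)
      | cons a t =>
        simp [parseLoop, h, pvSplit, pvPrep, ih, hs]

theorem pvGoB_out (lines : List String) :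
    ∀ (ds : List Int) (s : Int) (out : List (List (List String))),
      pvGoB lines ds s out = out ++ pvGoB lines ds s [] := by
  intro ds
  induction ds with
  | nil => intro s out; simp [pvGoB]
  | cons p ps ih =>
    intro s out
    simp only [pvGoB, List.nil_append]
    rw [ih, ih (p + 1) [(PySem.List.slice lines (some s) (some p)).map pvSetOf]]
    simp

theorem pvGoB_shift (l : String) (ls : List String) :
    ∀ (ds : List Int) (s : Int), 0 ≤ s → (∀ d ∈ ds, 0 ≤ d) →
      pvGoB (l :: ls) (ds.map (· + 1)) (s + 1) [] = pvGoB ls ds s [] := by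
  intro ds
  induction ds with
  | nil =>
    intro s hs _
    simp only [List.map_nil, pvGoB]
    rw [PySem.List.slice_from _ (by omega), PySem.List.slice_from _ hs]
    have : (s + 1).toNat = s.toNat + 1 := by omega
    rw [this, List.drop_succ_cons]
  | cons p ps ih =>
    intro s hs hmem
    have hp : 0 ≤ p := hmem p (by simp)
    simp only [List.map_cons, pvGoB]
    rw [pvGoB_out (l :: ls), pvGoB_out ls]
    have hslice : PySem.List.slice (l :: ls) (some (s + 1)) (some (p + 1)) =
        PySem.List.slice ls (some s) (some p) := by
      rw [PySem.List.slice_toNat _ (by omega) (by omega),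
          PySem.List.slice_toNat _ hs hp]
      have h1 : (s + 1).toNat = s.toNat + 1 := by omega
      have h2 : (p + 1).toNat = p.toNat + 1 := by omega
      rw [h1, h2, List.drop_succ_cons]
      congr 1
      omega
    rw [hslice]
    have := ih (p + 1) (by omega) (fun d hd => hmem d (by simp [hd]))
    have h3 : p + 1 + 1 = (p + 1) + 1 := by ring
    rw [this]

theorem enum_filterMap_shift :
    ∀ (xs : List String) (s : Int),
      (PySem.List.enumerate xs (s + 1)).filterMap (fun p => if p.2 = "" then some p.1 else none)
        = ((PySem.List.enumerate xs s).filterMap (fun p => if p.2 = "" then some p.1 else none)).map (· + 1) := by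
  intro xs
  induction xs with
  | nil => intro s; simp [PySem.List.enumerate_nil]
  | cons x xs ih =>
    intro s
    rw [PySem.List.enumerate_cons, PySem.List.enumerate_cons]
    by_cases h : x = ""
    · simp only [List.filterMap_cons, h]
      rw [ih (s + 1)]
      simp
    · simp only [List.filterMap_cons, if_neg h]
      exact ih (s + 1)

theorem pvDelims_cons (l : String) (ls : List String) :
    pvDelims (l :: ls) =
      if l = "" then (0 : Int) :: (pvDelims ls).map (· + 1) else (pvDelims ls).map (· + 1) := by
  unfold pvDelims
  rw [PySem.List.enumerate_cons]
  by_cases h : l = ""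
  · simp only [List.filterMap_cons, h]
    rw [show (0 : Int) + 1 = 0 + 1 by ring, enum_filterMap_shift ls 0]
    simp
  · simp only [List.filterMap_cons, if_neg h]
    rw [show (0 : Int) + 1 = 0 + 1 by ring, enum_filterMap_shift ls 0]
    try simp [h]

theorem pvDelims_nonneg : ∀ (lines : List String), ∀ d ∈ pvDelims lines, 0 ≤ d := by
  intro lines
  induction lines with
  | nil => intro d hd; simp [pvDelims, PySem.List.enumerate_nil] at hd
  | cons l ls ih =>
    intro d hd
    rw [pvDelims_cons] at hd
    split_ifs at hd with h
    · simp only [List.mem_cons] at hd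
      rcases hd with hd | hd
      · omega
      · simp only [List.mem_map] at hd
        obtain ⟨a, ha, rfl⟩ := hd
        have := ih a ha
        omega
    · simp only [List.mem_map] at hd
      obtain ⟨a, ha, rfl⟩ := hd
      have := ih a ha
      omega

theorem parse_alt_eq_split : ∀ (lines : List String), parse_alt lines = pvSplit lines := by
  intro lines
  induction lines with
  | nil =>
    simp [parse_alt, pvDelims, PySem.List.enumerate_nil, pvGoB, pvSplit,
      PySem.List.slice_from _ (le_refl (0 : Int))]
  | cons l ls ih =>
    unfold parse_alt
    rw [pvDelims_cons]
    by_cases h : l = ""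
    · simp only [if_pos h]
      simp only [pvGoB]
      rw [pvGoB_out]
      rw [pvGoB_shift l ls (pvDelims ls) 0 (le_refl 0) (pvDelims_nonneg ls)]
      have hsl : PySem.List.slice (l :: ls) (some (0 : Int)) (some (0 : Int)) = [] := by
        rw [PySem.List.slice_toNat _ (le_refl 0) (le_refl 0)]
        simp
      rw [hsl]
      unfold parse_alt at ih
      rw [ih]
      simp [pvSplit, h]
    · simp only [if_neg h]
      cases hds : pvDelims ls with
      | nil =>
        simp only [List.map_nil, pvGoB]
        rw [PySem.List.slice_from _ (le_refl (0 : Int))]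
        unfold parse_alt at ih
        rw [hds] at ih
        simp only [pvGoB] at ih
        rw [PySem.List.slice_from _ (le_refl (0 : Int))] at ih
        simp only [Int.toNat_zero, List.drop_zero] at ih ⊢
        simp [pvSplit, h, ← ih]
      | cons p ps =>
        have hp : 0 ≤ p := pvDelims_nonneg ls p (by rw [hds]; simp)
        have hps : ∀ d ∈ ps, 0 ≤ d := fun d hd => pvDelims_nonneg ls d (by rw [hds]; simp [hd])
        simp only [List.map_cons, pvGoB]
        rw [pvGoB_out]
        have hsl : PySem.List.slice (l :: ls) (some (0 : Int)) (some (p + 1)) =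
            l :: PySem.List.slice ls (some (0 : Int)) (some p) := by
          rw [PySem.List.slice_toNat _ (le_refl 0) (by omega),
              PySem.List.slice_toNat _ (le_refl 0) hp]
          have h1 : (p + 1).toNat = p.toNat + 1 := by omega
          simp [h1, List.take_succ_cons]
        rw [hsl]
        rw [pvGoB_shift l ls ps (p + 1) (by omega) hps]
        unfold parse_alt at ih
        rw [hds] at ih
        simp only [pvGoB] at ih
        rw [pvGoB_out] at ih
        -- ih : [Y] ++ pvGoB ls ps (p+1) [] = pvSplit ls
        cases hsp : pvSplit ls with
        | nil => exact absurd hsp (pvSplit_ne_nil ls)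
        | cons g gs =>
          rw [hsp] at ih
          have hg : (PySem.List.slice ls (some (0 : Int)) (some p)).map pvSetOf = g := by
            have := congrArg (fun xs => List.head? xs) ih
            simpa using this
          rw [PySem.List.slice_zero_start] at hg
          have hgs : pvGoB ls ps (p + 1) [] = gs := by
            have := congrArg (fun xs => List.tail xs) ih
            simpa using this
          simp [pvSplit, h, hsp, hg, hgs]

theorem parse_eq_split (lines : List String) : parse lines = pvSplit lines := by
  unfold parse
  rw [parseLoop_eq]
  cases hsp : pvSplit lines with
  | nil => exact absurd hsp (pvSplit_ne_nil lines)
  | cons g gs => simp [pvPrep]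

-- ===== VERDICT (by name: the statement is the Claim_ definition above) =====
theorem parse_spec : Claim_equal_parse := by
  intro lines _
  unfold Spec_parse
  rw [parse_eq_split, parse_alt_eq_split]
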